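-- pv_equiv track=rewrite | github.com/rwaelder/research-tools | tem_radial.py | points_on_circle
-- ===== SOURCE A (Python) =====
-- def points_on_circle(x_center, y_center, radius): # midpoint circle algirithm
-- 	x = 0
-- 	y = radius
-- 	d = 5/4 - radius
-- 	points = []
--
-- 	while x <= y:
-- 		offset_x = x+x_center
-- 		offset_y = y+y_center
--
-- 		points.append( (x+x_center, y+y_center) )
-- 		points.append( (y+x_center, x+y_center) )
-- 		points.append( (-x+x_center, -y+y_center) )
-- 		points.append( (-y+x_center, -x+y_center) )
-- 		points.append( (x+x_center, -y+y_center) )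
-- 		points.append( (y+x_center, -x+y_center) )
-- 		points.append( (-x+x_center, y+y_center) )
-- 		points.append( (-y+x_center, x+y_center) )
--
-- 		if d < 0:
-- 			d = d + 2*x + 3
-- 		else:
-- 			d = d + 2*x - 2*y + 5
-- 			y -= 1
--
-- 		x += 1
--
-- 	return list(set(points))
-- ===== SOURCE B (Python) =====
-- # B computes each first-octant y directly by rounding sqrt(r^2 - x^2) (Newton integer
-- # square root), instead of A's incremental midpoint decision variable.
--
-- def _isqrt(n):
--     # floor integer square root by Newton's method (n >= 0)
--     if n == 0:
--         return 0
--     x = n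
--     y = (x + n // x) // 2
--     while y < x:
--         x = y
--         y = (x + n // x) // 2
--     return x
--
-- def points_on_circle(x_center, y_center, radius):
--     points = []
--     x = 0
--     while x <= radius:
--         # nearest integer to sqrt(radius^2 - x^2): smallest y with (2y+1)^2 > 4(r^2-x^2)
--         y = (_isqrt(4 * (radius * radius - x * x)) + 1) // 2
--         if y < x:
--             break
--         points.append( (x + x_center, y + y_center) )
--         points.append( (y + x_center, x + y_center) )
--         points.append( (-x + x_center, -y + y_center) )
--         points.append( (-y + x_center, -x + y_center) )
--         points.append( (x + x_center, -y + y_center) )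
--         points.append( (y + x_center, -x + y_center) )
--         points.append( (-x + x_center, y + y_center) )
--         points.append( (-y + x_center, x + y_center) )
--         x += 1
--     return list(set(points))
-- ===== Notes on version B (the rewrite author's own statement) =====
-- stated objective: alternative
-- what changed: B abandons the midpoint decision-variable recurrence entirely: for each x it computes the octant y directly as the rounded square root of radius^2 - x^2 via a Newton integer-sqrt helper, instead of A's incremental error term d with its if/else updates.
import Mathlib
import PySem

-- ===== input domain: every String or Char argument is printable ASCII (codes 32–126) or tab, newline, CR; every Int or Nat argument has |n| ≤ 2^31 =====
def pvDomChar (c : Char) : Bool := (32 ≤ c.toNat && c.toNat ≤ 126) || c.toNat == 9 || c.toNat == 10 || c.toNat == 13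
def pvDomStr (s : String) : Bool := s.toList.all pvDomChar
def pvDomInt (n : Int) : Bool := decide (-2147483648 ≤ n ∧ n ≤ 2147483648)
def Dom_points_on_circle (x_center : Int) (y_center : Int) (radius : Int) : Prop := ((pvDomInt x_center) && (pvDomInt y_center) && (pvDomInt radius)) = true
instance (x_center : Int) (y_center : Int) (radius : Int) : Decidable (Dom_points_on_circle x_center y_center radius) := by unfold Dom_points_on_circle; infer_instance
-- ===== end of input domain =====

-- B replaces A's midpoint decision-variable recurrence by a direct per-x computation
-- of the octant y as the rounded square root of radius^2 - x^2 (Newton integer sqrt);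
-- objective: alternative algorithm, same output list (and so the same list(set(...))).
-- A's Python float d = 5/4 - radius is tracked exactly as the integer 4*d (only the
-- sign of d is inspected, and d is always an integer plus 1/4 of magnitude far below
-- 2^52, so the scaled-integer recurrence is exact on Dom). Python's list(set(points))
-- is ported as PySem.Set.ofList; both ports build the identical points list.

-- ===== PORT A =====
-- A's while loop: state (x, y, d4 = 4*d), appending the 8 reflections each pass
def pocLoopA (x_center y_center : Int) (x y d4 : Int) (points : List (Int × Int)) :
    List (Int × Int) :=
  if x ≤ y then
    let points := points ++
      [(x + x_center, y + y_center), (y + x_center, x + y_center),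
       (-x + x_center, -y + y_center), (-y + x_center, -x + y_center),
       (x + x_center, -y + y_center), (y + x_center, -x + y_center),
       (-x + x_center, y + y_center), (-y + x_center, x + y_center)]
    if d4 < 0 then pocLoopA x_center y_center (x + 1) y (d4 + 8*x + 12) points
    else pocLoopA x_center y_center (x + 1) (y - 1) (d4 + 8*x - 8*y + 20) points
  else points
termination_by (y - x + 1).toNat
decreasing_by all_goals omega

def points_on_circle (x_center : Int) (y_center : Int) (radius : Int) : List (Int × Int) :=
  PySem.Set.ofList (pocLoopA x_center y_center 0 radius (5 - 4*radius) [])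

-- ===== PORT B =====
-- Source B's _isqrt Newton loop (the '0 < x' conjunct is a totality guard only: every
-- actual call keeps x ≥ 1, where it is always true, so the port is exact there)
def isqrtAux (n x : Int) : Int :=
  if 0 < x ∧ PySem.Int.floordiv (x + PySem.Int.floordiv n x) 2 < x then
    isqrtAux n (PySem.Int.floordiv (x + PySem.Int.floordiv n x) 2)
  else x
termination_by x.toNat
decreasing_by omega

def isqrtI (n : Int) : Int := if n = 0 then 0 else isqrtAux n n

-- Source B's main while loop: y is recomputed from scratch each pass
def pocLoopB (x_center y_center radius : Int) (x : Int) (points : List (Int × Int)) :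
    List (Int × Int) :=
  if x ≤ radius then
    let y := PySem.Int.floordiv (isqrtI (4 * (radius*radius - x*x)) + 1) 2
    if y < x then points
    else
      pocLoopB x_center y_center radius (x + 1) (points ++
        [(x + x_center, y + y_center), (y + x_center, x + y_center),
         (-x + x_center, -y + y_center), (-y + x_center, -x + y_center),
         (x + x_center, -y + y_center), (y + x_center, -x + y_center),
         (-x + x_center, y + y_center), (-y + x_center, x + y_center)])
  else points
termination_by (radius - x + 1).toNat
decreasing_by omega

def points_on_circle_alt (x_center : Int) (y_center : Int) (radius : Int) : List (Int × Int) :=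
  PySem.Set.ofList (pocLoopB x_center y_center radius 0 [])

-- ===== PRECONDITION & SPEC =====
def Spec_points_on_circle (x_center : Int) (y_center : Int) (radius : Int) (out : List (Int × Int)) : Prop := out = points_on_circle_alt x_center y_center radius
instance (x_center : Int) (y_center : Int) (radius : Int) (out : List (Int × Int)) : Decidable (Spec_points_on_circle x_center y_center radius out) := by unfold Spec_points_on_circle; infer_instance

-- ===== CLAIM (what is proved, stated in full; the proofs are below) =====
def Claim_equal_points_on_circle : Prop := ∀ (x_center : Int) (y_center : Int) (radius : Int), Dom_points_on_circle x_center y_center radius → Spec_points_on_circle x_center y_center radius (points_on_circle x_center y_center radius)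

-- ===== LEMMAS AND PROOFS =====

-- Newton's iteration returns the floor square root: invariant n < (x+1)^2, 0 < x
theorem isqrtAux_spec : ∀ (m : Nat) (n x : Int), x.toNat ≤ m → 0 < n → 0 < x →
    n < (x + 1) * (x + 1) →
    0 < isqrtAux n x ∧ isqrtAux n x * isqrtAux n x ≤ n ∧
      n < (isqrtAux n x + 1) * (isqrtAux n x + 1) := by
  intro m
  induction m with
  | zero => intro n x hm hn hx _; omega
  | succ m ih =>
    intro n x hm hn hx hub
    have hq0 : 0 ≤ PySem.Int.floordiv n x := by
      rw [PySem.Int.floordiv_eq_ediv_of_pos hx]; exact Int.ediv_nonneg hn.le hx.le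
    have hqe : x * (PySem.Int.floordiv n x) + n % x = n := by
      rw [PySem.Int.floordiv_eq_ediv_of_pos hx]; exact Int.mul_ediv_add_emod n x
    have hr0 : 0 ≤ n % x := Int.emod_nonneg n (by omega)
    have hrx : n % x < x := Int.emod_lt_of_pos n hx
    set q := PySem.Int.floordiv n x with hqdef
    have hy : PySem.Int.floordiv (x + q) 2 = (x + q) / 2 :=
      PySem.Int.floordiv_eq_ediv_of_pos (by norm_num)
    set y := PySem.Int.floordiv (x + q) 2 with hydef
    have hy2 : 2 * y ≤ x + q ∧ x + q < 2 * y + 2 := by rw [hy]; omega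
    rw [isqrtAux]
    by_cases hc : 0 < x ∧ y < x
    · rw [if_pos hc]
      -- 1 ≤ y
      have hy1 : 1 ≤ y := by
        rcases eq_or_lt_of_le (by omega : (1:Int) ≤ x) with h1 | h2
        · exfalso; rw [← h1] at hqe hrx hr0; omega
        · omega
      -- n < (y+1)^2
      have hle : n ≤ x * q + x - 1 := by linarith
      have hqub : q ≤ 2 * y + 1 - x := by omega
      have hxm : x * q ≤ x * (2 * y + 1 - x) := mul_le_mul_of_nonneg_left hqub hx.le
      have hnew : n < (y + 1) * (y + 1) := by nlinarith [sq_nonneg (y + 1 - x)]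
      exact ih n y (by omega) hn hy1 hnew
    · rw [if_neg hc]
      have hxy : x ≤ y := by omega
      have hxq : x ≤ q := by omega
      have : x * x ≤ x * q := mul_le_mul_of_nonneg_left hxq hx.le
      exact ⟨hx, by linarith, hub⟩

-- the rounded square root y = (isqrt(D)+1)//2: 0 ≤ y, (2y+1)^2 > D, and (2y-1)^2 ≤ D for y ≥ 1
theorem ycf_char (D y : Int) (hD : 0 ≤ D)
    (hy : y = PySem.Int.floordiv (isqrtI D + 1) 2) :
    0 ≤ y ∧ D < (2*y + 1) * (2*y + 1) ∧ (1 ≤ y → (2*y - 1) * (2*y - 1) ≤ D) := by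
  rcases eq_or_lt_of_le hD with h0 | hpos
  · have : isqrtI D = 0 := by rw [← h0]; rfl
    rw [this] at hy
    have : y = 0 := by
      rw [hy, PySem.Int.floordiv_eq_ediv_of_pos (by norm_num)]; decide
    subst this; omega
  · have hs := isqrtAux_spec D.toNat D D (by omega) hpos hpos (by nlinarith)
    have hsi : isqrtI D = isqrtAux D D := by rw [isqrtI, if_neg (by omega)]
    rw [← hsi] at hs
    obtain ⟨hs0, hs1, hs2⟩ := hs
    set s := isqrtI D with hsdef
    rw [PySem.Int.floordiv_eq_ediv_of_pos (by norm_num)] at hy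
    have hyb : 2 * y ≤ s + 1 ∧ s + 1 < 2 * y + 2 := by rw [hy]; omega
    refine ⟨by omega, ?_, ?_⟩
    · have h1 : s + 1 ≤ 2 * y + 1 := by omega
      nlinarith
    · intro hy1
      have h2 : 0 ≤ 2 * y - 1 := by omega
      have h3 : 2 * y - 1 ≤ s := by omega
      nlinarith

-- under the loop invariants, once y < x B's loop stops immediately
theorem loopB_stop (cx cy r x y : Int) (hx : 0 ≤ x) (hxy2 : x ≤ y + 2)
    (hx0 : x = 0 → y = r) (hub : 4 * (r*r - x*x) < (2*y + 1) * (2*y + 1))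
    (hxy : y < x) (acc : List (Int × Int)) : pocLoopB cx cy r x acc = acc := by
  rw [pocLoopB]
  by_cases hxr : x ≤ r
  · have hx1 : 1 ≤ x := by
      rcases eq_or_lt_of_le hx with h | h
      · exfalso; have := hx0 h.symm; omega
      · omega
    have hD : 0 ≤ 4 * (r*r - x*x) := by nlinarith
    obtain ⟨hy'0, hy'ub, hy'lb⟩ := ycf_char (4 * (r*r - x*x)) _ hD rfl
    set y' := PySem.Int.floordiv (isqrtI (4 * (r*r - x*x)) + 1) 2 with hy'def
    have hyx' : y' < x := by
      by_contra hc
      have h1 : (2*y' - 1) * (2*y' - 1) ≤ 4 * (r*r - x*x) := hy'lb (by omega)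
      have h2 : (0:Int) ≤ (2*y' - 2*y - 2) * (2*y' + 2*y) :=
        mul_nonneg (by omega) (by omega)
      nlinarith
    rw [if_pos hxr]
    show (if y' < x then acc else _) = acc
    rw [if_pos hyx']
  · rw [if_neg hxr]

-- main equivalence of the two loops, by induction on the remaining octant width
theorem loops_eq (cx cy r : Int) : ∀ (n : Nat) (x y d4 : Int),
    (y - x + 1).toNat ≤ n → 0 ≤ x → y ≤ r → x ≤ y + 2 → (x = 0 → y = r) →
    d4 = 4*(x+1)*(x+1) + (2*y-1)*(2*y-1) - 4*r*r →
    4 * (r*r - x*x) < (2*y + 1) * (2*y + 1) →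
    (x ≤ y → ((2*y - 1) * (2*y - 1) ≤ 4 * (r*r - x*x) ∨ y = 0)) →
    ∀ acc, pocLoopA cx cy x y d4 acc = pocLoopB cx cy r x acc := by
  intro n
  induction n with
  | zero =>
    intro x y d4 hn hx hyr hxy2 hx0 hd4 hub hlb acc
    have hxy : y < x := by omega
    rw [pocLoopA, if_neg (by omega), loopB_stop cx cy r x y hx hxy2 hx0 hub hxy]
  | succ n ih =>
    intro x y d4 hn hx hyr hxy2 hx0 hd4 hub hlb acc
    by_cases hxy : x ≤ y
    · have hxr : x ≤ r := by omega
      have hD : 0 ≤ 4 * (r*r - x*x) := by nlinarith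
      obtain ⟨hy'0, hy'ub, hy'lb⟩ := ycf_char (4 * (r*r - x*x)) _ hD rfl
      set y' := PySem.Int.floordiv (isqrtI (4 * (r*r - x*x)) + 1) 2 with hy'def
      -- the recomputed y' equals A's running y
      have hyy' : y' = y := by
        rcases lt_trichotomy y' y with h | h | h
        · rcases hlb hxy with hl | hl
          · have h2 : (0:Int) ≤ (2*y - 2*y' - 2) * (2*y + 2*y') :=
              mul_nonneg (by omega) (by omega)
            nlinarith
          · omega
        · exact h
        · have h1 : (2*y' - 1) * (2*y' - 1) ≤ 4 * (r*r - x*x) := hy'lb (by omega)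
          have h2 : (0:Int) ≤ (2*y' - 2*y - 2) * (2*y' + 2*y) :=
            mul_nonneg (by omega) (by omega)
          nlinarith
      rw [pocLoopA, pocLoopB]
      simp only [if_pos hxy, if_pos hxr, ← hy'def, hyy',
        if_neg (show ¬ (y < x) from by omega)]
      by_cases hd : d4 < 0
      · simp only [if_pos hd]
        have hlt : (2*y - 1) * (2*y - 1) < 4 * (r*r - (x+1)*(x+1)) := by nlinarith
        exact ih (x+1) y _ (by omega) (by omega) hyr (by omega) (by omega)
          (by rw [hd4]; ring) (by nlinarith) (fun _ => Or.inl hlt.le) _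
      · simp only [if_neg hd]
        have hge : 4 * (r*r - (x+1)*(x+1)) ≤ (2*y - 1) * (2*y - 1) := by nlinarith
        -- strictness by parity: (2y-1)^2 is odd, 4(r^2-(x+1)^2) is divisible by 4
        have hne : (2*y - 1) * (2*y - 1) ≠ 4 * (r*r - (x+1)*(x+1)) := by
          intro h
          have h1 : 4*(y*y - y) + 1 = 4 * (r*r - (x+1)*(x+1)) := by linarith [h, sq_nonneg y, (by ring : (2*y-1)*(2*y-1) = 4*(y*y-y)+1)]
          generalize y*y - y = a at h1
          generalize r*r - (x+1)*(x+1) = b at h1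
          omega
        refine ih (x+1) (y-1) _ (by omega) (by omega) (by omega) (by omega) (by omega)
          (by rw [hd4]; ring) (by nlinarith [lt_of_le_of_ne hge hne.symm]) ?_ _
        intro hx1y
        left
        rcases hlb hxy with hl | hl
        · nlinarith
        · omega
    · have hxy' : y < x := by omega
      rw [pocLoopA, if_neg (by omega), loopB_stop cx cy r x y hx hxy2 hx0 hub hxy']

-- ===== VERDICT (by name: the statement is the Claim_ definition above) =====
theorem points_on_circle_spec : Claim_equal_points_on_circle := by
  intro cx cy r _
  unfold Spec_points_on_circle points_on_circle points_on_circle_alt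
  by_cases hr : 0 ≤ r
  · rw [loops_eq cx cy r (r + 1).toNat 0 r (5 - 4*r) (by omega) le_rfl le_rfl
      (by omega) (fun _ => rfl) (by ring) (by nlinarith) ?_ []]
    intro _
    rcases eq_or_lt_of_le hr with h | h
    · right; omega
    · left; nlinarith
  · rw [pocLoopA, pocLoopB]
    rw [if_neg (by omega), if_neg (by omega)]
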